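-- pv_equiv track=rewrite | github.com/pbies/bitcoin-tools | dump_wallet-v4.py | categorize_wallet_data
-- ===== SOURCE A (Python) =====
-- def categorize_wallet_data(wallet_data):
--     categorized = {
--         "addresses": [],
--         "keys": [],
--         "transactions": [],
--         "metadata": []
--     }
--
--     for key, value in wallet_data.items():
--         if key.startswith("30") or key.startswith("32"):  # Example: Address-like keys
--             categorized["addresses"].append({"key": key, "value": value})
--         elif key.startswith("2b") or key.startswith("2c"):  # Example: Private keys
--             categorized["keys"].append({"key": key, "value": value})
--         elif key.startswith("01"):  # Example: Transactions
--             categorized["transactions"].append({"key": key, "value": value})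
--         else:
--             categorized["metadata"].append({"key": key, "value": value})
--
--     return categorized
-- ===== SOURCE B (Python) =====
-- def categorize_wallet_data(wallet_data):
--     items = wallet_data.items()
--
--     def tag(key):
--         p = key[:2]
--         if p in ("30", "32"):
--             return "addresses"
--         if p in ("2b", "2c"):
--             return "keys"
--         return "transactions" if p == "01" else "metadata"
--
--     return {c: [{"key": k, "value": v} for k, v in items if tag(k) == c]
--             for c in ("addresses", "keys", "transactions", "metadata")}
-- ===== Notes on version B (the rewrite author's own statement) =====
-- stated objective: idiomatic
-- what changed: Replaces the single loop that mutates lists inside a pre-built dict with a prefix-slice tagging helper plus a dict comprehension of four independent filtering passes.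
import Mathlib
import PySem

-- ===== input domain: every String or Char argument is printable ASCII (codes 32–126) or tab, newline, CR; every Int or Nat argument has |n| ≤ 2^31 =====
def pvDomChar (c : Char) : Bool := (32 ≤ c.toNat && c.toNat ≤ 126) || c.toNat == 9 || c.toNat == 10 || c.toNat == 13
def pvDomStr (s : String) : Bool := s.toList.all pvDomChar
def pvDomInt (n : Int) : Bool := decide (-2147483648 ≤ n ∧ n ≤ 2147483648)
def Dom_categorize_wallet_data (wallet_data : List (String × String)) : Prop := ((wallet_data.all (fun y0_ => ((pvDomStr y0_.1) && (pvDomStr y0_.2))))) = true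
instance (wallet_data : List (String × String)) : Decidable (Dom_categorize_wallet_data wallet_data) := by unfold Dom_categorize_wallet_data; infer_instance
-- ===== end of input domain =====

-- B replaces A's single loop mutating lists inside a pre-built dict by a prefix-slice
-- tagging helper plus four independent filtering passes (objective: idiomatic).

-- ===== PORT A =====
-- A iterates wallet_data.items() and appends {"key": k, "value": v} to one of four
-- lists held in the dict `categorized`; the dict parameter is the association list,
-- so .items() is (PySem.Dict.ofList wallet_data).items.
def categorize_wallet_data (wallet_data : List (String × String)) : List (String × List (List (String × String))) :=
  let categorized : PySem.Dict String (List (List (String × String))) :=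
    PySem.Dict.ofList [("addresses", []), ("keys", []), ("transactions", []), ("metadata", [])]
  let categorized :=
    (PySem.Dict.ofList wallet_data).items.foldl (fun d kv =>
      let key := kv.1
      let value := kv.2
      if PySem.Str.startswith key "30" || PySem.Str.startswith key "32" then
        d.modify "addresses" [] (· ++ [[("key", key), ("value", value)]])
      else if PySem.Str.startswith key "2b" || PySem.Str.startswith key "2c" then
        d.modify "keys" [] (· ++ [[("key", key), ("value", value)]])
      else if PySem.Str.startswith key "01" then
        d.modify "transactions" [] (· ++ [[("key", key), ("value", value)]])
      else
        d.modify "metadata" [] (· ++ [[("key", key), ("value", value)]])) categorized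
  categorized.items

-- ===== PORT B =====
-- tag(key): classify by the two-character slice key[:2]
def pvTag (key : String) : String :=
  let p := PySem.Str.slice key none (some 2)
  if p = "30" ∨ p = "32" then "addresses"
  else if p = "2b" ∨ p = "2c" then "keys"
  else if p = "01" then "transactions" else "metadata"

def categorize_wallet_data_alt (wallet_data : List (String × String)) : List (String × List (List (String × String))) :=
  let items := (PySem.Dict.ofList wallet_data).items
  ["addresses", "keys", "transactions", "metadata"].map (fun c =>
    (c, (items.filter (fun kv => pvTag kv.1 = c)).map (fun kv => [("key", kv.1), ("value", kv.2)])))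

-- ===== PRECONDITION & SPEC =====
def Spec_categorize_wallet_data (wallet_data : List (String × String)) (out : List (String × List (List (String × String)))) : Prop := out = categorize_wallet_data_alt wallet_data
instance (wallet_data : List (String × String)) (out : List (String × List (List (String × String)))) : Decidable (Spec_categorize_wallet_data wallet_data out) := by unfold Spec_categorize_wallet_data; infer_instance

-- ===== CLAIM (what is proved, stated in full; the proofs are below) =====
def Claim_equal_categorize_wallet_data : Prop := ∀ (wallet_data : List (String × String)), Dom_categorize_wallet_data wallet_data → Spec_categorize_wallet_data wallet_data (categorize_wallet_data wallet_data)

-- ===== LEMMAS AND PROOFS =====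

-- startswith with a length-2 prefix is the same test as comparing the slice key[:2]
theorem startswith_eq_slice2 (k p : String) (hp : p.toList.length = 2) :
    PySem.Str.startswith k p = true ↔ PySem.Str.slice k none (some 2) = p := by
  unfold PySem.Str.startswith PySem.Str.slice PySem.Chars.startswith PySem.Chars.slice
  rw [show ((2 : Int)) = ((2 : Nat) : Int) by norm_num, PySem.List.slice_to_natCast]
  constructor
  · intro h
    rw [List.isPrefixOf_iff_prefix] at h
    obtain ⟨t, ht⟩ := h
    have h2 : k.toList.take 2 = p.toList := by
      rw [← ht, ← hp, List.take_left]
    rw [h2, String.ofList_toList]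
  · intro h
    have h2 : k.toList.take 2 = p.toList := by
      have := congrArg String.toList h
      simpa using this
    rw [List.isPrefixOf_iff_prefix, ← h2]
    exact List.take_prefix _ _

-- A's branch cascade computes exactly pvTag
theorem tag_eq (k : String) :
    pvTag k = (if PySem.Str.startswith k "30" || PySem.Str.startswith k "32" then "addresses"
      else if PySem.Str.startswith k "2b" || PySem.Str.startswith k "2c" then "keys"
      else if PySem.Str.startswith k "01" then "transactions" else "metadata") := by
  unfold pvTag
  simp only [Bool.or_eq_true,
    startswith_eq_slice2 k "30" (by decide), startswith_eq_slice2 k "32" (by decide),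
    startswith_eq_slice2 k "2b" (by decide), startswith_eq_slice2 k "2c" (by decide),
    startswith_eq_slice2 k "01" (by decide)]

-- A's loop body is one modify at the pvTag-selected key
theorem step_eq (d : PySem.Dict String (List (List (String × String)))) (kv : String × String) :
    (fun d kv =>
      let key := kv.1
      let value := kv.2
      if PySem.Str.startswith key "30" || PySem.Str.startswith key "32" then
        d.modify "addresses" [] (· ++ [[("key", key), ("value", value)]])
      else if PySem.Str.startswith key "2b" || PySem.Str.startswith key "2c" then
        d.modify "keys" [] (· ++ [[("key", key), ("value", value)]])
      else if PySem.Str.startswith key "01" then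
        d.modify "transactions" [] (· ++ [[("key", key), ("value", value)]])
      else
        d.modify "metadata" [] (· ++ [[("key", key), ("value", value)]])) d kv
    = d.modify (pvTag kv.1) [] (· ++ [[("key", kv.1), ("value", kv.2)]]) := by
  simp only [tag_eq]
  split_ifs <;> rfl

theorem tag_cases (k : String) :
    pvTag k = "addresses" ∨ pvTag k = "keys" ∨ pvTag k = "transactions" ∨ pvTag k = "metadata" := by
  unfold pvTag
  dsimp only
  split_ifs <;> simp

-- main loop invariant: the fold over any item list, started from the literal dict with
-- the four accumulators, yields the four filtered lists appended.
theorem loop_items (l : List (String × String))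
    (as ks ts ms : List (List (String × String))) :
    (l.foldl (fun d kv => d.modify (pvTag kv.1) [] (· ++ [[("key", kv.1), ("value", kv.2)]]))
      (PySem.Dict.mk [("addresses", as), ("keys", ks), ("transactions", ts), ("metadata", ms)])).items
    = [("addresses", as ++ (l.filter (fun kv => pvTag kv.1 = "addresses")).map (fun kv => [("key", kv.1), ("value", kv.2)])),
       ("keys", ks ++ (l.filter (fun kv => pvTag kv.1 = "keys")).map (fun kv => [("key", kv.1), ("value", kv.2)])),
       ("transactions", ts ++ (l.filter (fun kv => pvTag kv.1 = "transactions")).map (fun kv => [("key", kv.1), ("value", kv.2)])),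
       ("metadata", ms ++ (l.filter (fun kv => pvTag kv.1 = "metadata")).map (fun kv => [("key", kv.1), ("value", kv.2)]))] := by
  induction l generalizing as ks ts ms with
  | nil => simp
  | cons kv l ih =>
    rw [List.foldl_cons]
    rcases tag_cases kv.1 with hc | hc | hc | hc
    · rw [hc,
        show (PySem.Dict.mk [("addresses", as), ("keys", ks), ("transactions", ts), ("metadata", ms)]).modify "addresses" [] (· ++ [[("key", kv.1), ("value", kv.2)]])
          = PySem.Dict.mk [("addresses", as ++ [[("key", kv.1), ("value", kv.2)]]), ("keys", ks), ("transactions", ts), ("metadata", ms)] from rfl,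
        ih]
      simp [hc]
    · rw [hc,
        show (PySem.Dict.mk [("addresses", as), ("keys", ks), ("transactions", ts), ("metadata", ms)]).modify "keys" [] (· ++ [[("key", kv.1), ("value", kv.2)]])
          = PySem.Dict.mk [("addresses", as), ("keys", ks ++ [[("key", kv.1), ("value", kv.2)]]), ("transactions", ts), ("metadata", ms)] from rfl,
        ih]
      simp [hc]
    · rw [hc,
        show (PySem.Dict.mk [("addresses", as), ("keys", ks), ("transactions", ts), ("metadata", ms)]).modify "transactions" [] (· ++ [[("key", kv.1), ("value", kv.2)]])
          = PySem.Dict.mk [("addresses", as), ("keys", ks), ("transactions", ts ++ [[("key", kv.1), ("value", kv.2)]]), ("metadata", ms)] from rfl,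
        ih]
      simp [hc]
    · rw [hc,
        show (PySem.Dict.mk [("addresses", as), ("keys", ks), ("transactions", ts), ("metadata", ms)]).modify "metadata" [] (· ++ [[("key", kv.1), ("value", kv.2)]])
          = PySem.Dict.mk [("addresses", as), ("keys", ks), ("transactions", ts), ("metadata", ms ++ [[("key", kv.1), ("value", kv.2)]])] from rfl,
        ih]
      simp [hc]

-- ===== VERDICT (by name: the statement is the Claim_ definition above) =====
theorem categorize_wallet_data_spec : Claim_equal_categorize_wallet_data := by
  intro wallet_data _
  unfold Spec_categorize_wallet_data categorize_wallet_data categorize_wallet_data_alt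
  rw [show (fun d kv =>
      let key := kv.1
      let value := kv.2
      if PySem.Str.startswith key "30" || PySem.Str.startswith key "32" then
        d.modify "addresses" [] (· ++ [[("key", key), ("value", value)]])
      else if PySem.Str.startswith key "2b" || PySem.Str.startswith key "2c" then
        d.modify "keys" [] (· ++ [[("key", key), ("value", value)]])
      else if PySem.Str.startswith key "01" then
        d.modify "transactions" [] (· ++ [[("key", key), ("value", value)]])
      else
        d.modify "metadata" [] (· ++ [[("key", key), ("value", value)]]))
    = (fun d kv => d.modify (pvTag kv.1) [] (· ++ [[("key", kv.1), ("value", kv.2)]]))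
    from funext fun d => funext fun kv => step_eq d kv]
  simpa using loop_items (PySem.Dict.ofList wallet_data).items [] [] [] []
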